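-- pv_equiv track=rewrite | github.com/puapinyoying/prw-gui | prwlib/rwparser.py | fillTranspose
-- ===== SOURCE A (Python) =====
-- def fillTranspose(listOfStreaks):
--     """ Takes a list of lists (sample data arranged longitudinally), each sublist
--     starts with a header. Converts it to column format (vertical arrangement)
--     to make it easy to print"""
--
--     # Find length of longest sublist
--     listLen = len(listOfStreaks)
--     maxSubLen = 0
--     for l in listOfStreaks:
--         subListLen = len(l)
--         if subListLen > maxSubLen:
--             maxSubLen = subListLen
--
--     # Need to even out the row lengths first, make new list of lists that have
--     # even number of rows per column
--     matrixOfStreaks = []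
--     for m in range(0, listLen):
--         matrixOfStreaks.append([])
--         for n in range(0, maxSubLen):
--             matrixOfStreaks[m].append('')
--
--     #print matrixOfStreaks
--
--     # # Fill new matrix with original data
--     for p in range(0, listLen):
--         for q in range(0, len(listOfStreaks[p])):
--             matrixOfStreaks[p][q] = listOfStreaks[p][q]
--
--
--     # Generate a matrix wilth all equal rows, fill blanks with emptys ''
--     transposedList = []
--     for i in range(0, maxSubLen):
--         transposedList.append([])
--         for j in range(0, listLen):
--             transposedList[i].append('')
--
--     # Now transfer data from listOfStreaks to new transposedList in right order
--     for x in range(0, listLen):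
--         for y in range(0, len(listOfStreaks[x])):
--             transposedList[y][x] = listOfStreaks[x][y]
--     #print transposedList
--
--     return transposedList
-- ===== SOURCE B (Python) =====
-- def fillTranspose(listOfStreaks):
--     """Single streaming pass: walk the rows once, growing the list of columns
--     on demand (a newly discovered column is padded with '' for every row
--     already seen), and append one cell to every column per row."""
--     cols = []
--     for k, row in enumerate(listOfStreaks):
--         for _ in range(len(row) - len(cols)):
--             cols.append([''] * k)
--         for i, col in enumerate(cols):
--             col.append(row[i] if i < len(row) else '')
--     return cols
-- ===== Notes on version B (the rewrite author's own statement) =====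
-- stated objective: alternative
-- what changed: B makes a single streaming pass over the rows, growing the column list on demand (padding each newly discovered column with '' for the rows already seen) and appending one cell per column per row, instead of A's staged passes: a max-length scan, two preallocated blank grids, and an index scatter.
import Mathlib
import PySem

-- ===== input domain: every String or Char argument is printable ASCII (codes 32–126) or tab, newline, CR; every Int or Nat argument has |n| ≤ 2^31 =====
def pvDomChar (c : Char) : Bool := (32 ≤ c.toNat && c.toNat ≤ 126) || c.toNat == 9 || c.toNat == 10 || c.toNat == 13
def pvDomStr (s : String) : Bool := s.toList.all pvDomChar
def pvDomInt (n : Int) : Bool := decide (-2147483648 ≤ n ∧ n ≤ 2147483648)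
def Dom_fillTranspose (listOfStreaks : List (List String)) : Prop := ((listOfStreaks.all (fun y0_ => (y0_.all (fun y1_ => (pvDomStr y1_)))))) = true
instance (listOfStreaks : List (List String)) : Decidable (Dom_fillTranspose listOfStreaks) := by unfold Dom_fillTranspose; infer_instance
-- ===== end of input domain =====

-- B replaces A's staged construction (max-length scan, two preallocated blank grids, index
-- scatter) by one streaming pass over the rows that grows the column list on demand.

-- ===== PORT A =====
-- `maxSubLen` loop of A
def pyMaxSubLen (xs : List (List String)) : Nat :=
  xs.foldl (fun m l => if l.length > m then l.length else m) 0

-- A's blank-grid builder: `for _ in range(n): out.append(['' for _ in range(rowLen)])`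
def blankRows (n rowLen : Nat) : List (List String) :=
  (List.range n).foldl (fun t _ => t ++ [(List.range rowLen).map (fun _ => "")]) []

-- A's inner scatter loop: `for y in range(len(col)): t[y][x] = col[y]`
-- (indices are always in range in A, so `set`/`getD` are exact)
def scatterInner (x : Nat) (col : List String) (t : List (List String)) : List (List String) :=
  (List.range col.length).foldl (fun t y => t.set y ((t.getD y []).set x (col.getD y ""))) t

-- A's outer scatter loop: `for x in range(listLen): ...`
def scatter (xs : List (List String)) (t : List (List String)) : List (List String) :=
  (List.range xs.length).foldl (fun t x => scatterInner x (xs.getD x []) t) t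

def fillTranspose (listOfStreaks : List (List String)) : List (List String) :=
  let listLen := listOfStreaks.length
  let maxSubLen := pyMaxSubLen listOfStreaks
  -- A builds and fills `matrixOfStreaks` but never uses it; ported and discarded likewise
  let matrix0 := blankRows listLen maxSubLen
  let _matrixOfStreaks := (List.range listLen).foldl (fun mat p =>
      (List.range (listOfStreaks.getD p []).length).foldl (fun mat q =>
        mat.set p ((mat.getD p []).set q ((listOfStreaks.getD p []).getD q ""))) mat) matrix0
  let transposed0 := blankRows maxSubLen listLen
  scatter listOfStreaks transposed0

-- ===== PORT B =====
-- body of B's `for k, row in enumerate(...)` loop: grow `cols` with blank columns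
-- (padded for the k rows already seen), then append one cell to every column
def growStep (k : Nat) (cols : List (List String)) (row : List String) : List (List String) :=
  let cols := cols ++ List.replicate (row.length - cols.length) (List.replicate k "")
  cols.mapIdx (fun i col => col ++ [row.getD i ""])  -- `row[i] if i < len(row) else ''`

def fillTranspose_alt (listOfStreaks : List (List String)) : List (List String) :=
  (listOfStreaks.foldl (fun (st : Nat × List (List String)) row =>
      (st.1 + 1, growStep st.1 st.2 row)) (0, [])).2

-- ===== PRECONDITION & SPEC =====
def Spec_fillTranspose (listOfStreaks : List (List String)) (out : List (List String)) : Prop := out = fillTranspose_alt listOfStreaks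
instance (listOfStreaks : List (List String)) (out : List (List String)) : Decidable (Spec_fillTranspose listOfStreaks out) := by unfold Spec_fillTranspose; infer_instance

-- ===== CLAIM (what is proved, stated in full; the proofs are below) =====
def Claim_equal_fillTranspose : Prop := ∀ (listOfStreaks : List (List String)), Dom_fillTranspose listOfStreaks → Spec_fillTranspose listOfStreaks (fillTranspose listOfStreaks)

-- ===== LEMMAS AND PROOFS =====

-- proof-side middle form: the padded transpose written as a closed map
def transM (xs : List (List String)) : Nat := (xs.map List.length).foldl max 0

def colForm (xs : List (List String)) : List (List String) :=
  (List.range (transM xs)).map (fun i => xs.map (fun row => row.getD i ""))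

def scatterK (xs : List (List String)) (k : Nat) : List (List String) :=
  (List.range k).foldl (fun t x => scatterInner x (xs.getD x []) t)
    (List.replicate (transM xs) (List.replicate xs.length ""))

-- the two maximum computations agree
theorem pyMaxSubLen_eq_aux (xs : List (List String)) : ∀ acc : Nat,
    xs.foldl (fun m l => if l.length > m then l.length else m) acc
      = (xs.map List.length).foldl max acc := by
  induction xs with
  | nil => intro acc; rfl
  | cons l xs ih =>
    intro acc
    simp only [List.foldl, List.map]
    rw [ih]
    congr 1
    split <;> omega

theorem pyMaxSubLen_eq (xs : List (List String)) : pyMaxSubLen xs = transM xs :=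
  pyMaxSubLen_eq_aux xs 0

theorem le_foldl_max (ys : List Nat) : ∀ acc : Nat,
    acc ≤ ys.foldl max acc ∧ ∀ a ∈ ys, a ≤ ys.foldl max acc := by
  induction ys with
  | nil => intro acc; simp
  | cons b ys ih =>
    intro acc
    simp only [List.foldl, List.mem_cons]
    refine ⟨le_trans (le_max_left _ _) (ih (max acc b)).1, ?_⟩
    rintro a (rfl | ha)
    · exact le_trans (le_max_right _ _) (ih (max acc a)).1
    · exact (ih (max acc b)).2 a ha

theorem sublen_le_max (xs : List (List String)) (x : Nat) :
    (xs.getD x []).length ≤ transM xs := by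
  by_cases h : x < xs.length
  · have hm : (xs.getD x []).length ∈ xs.map List.length := by
      rw [List.getD_eq_getElem _ _ h]
      exact List.mem_map.2 ⟨xs[x], List.getElem_mem h, rfl⟩
    exact (le_foldl_max _ 0).2 _ hm
  · rw [List.getD_eq_getElem?_getD, List.getElem?_eq_none (by omega)]
    simp

-- blankRows is a replicate
theorem blankRows_aux (row : List String) : ∀ (n : Nat) (init : List (List String)),
    (List.range n).foldl (fun t _ => t ++ [row]) init = init ++ List.replicate n row := by
  intro n
  induction n with
  | zero => simp
  | succ n ih =>
    intro init
    rw [List.range_succ, List.foldl_append, ih]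
    simp [List.replicate_succ' (n := n)]

theorem blankRows_eq (n rowLen : Nat) :
    blankRows n rowLen = List.replicate n (List.replicate rowLen "") := by
  unfold blankRows
  rw [blankRows_aux]
  simp [List.map_const']

-- getD of a set, spelled as a conditional
theorem getD_set_str (l : List String) (i j : Nat) (a : String) :
    (l.set i a).getD j "" = if j = i ∧ i < l.length then a else l.getD j "" := by
  rw [List.getD_eq_getElem?_getD, List.getD_eq_getElem?_getD, List.getElem?_set]
  by_cases hij : i = j
  · subst hij
    by_cases h2 : i < l.length
    · rw [if_pos rfl, if_pos h2, if_pos ⟨rfl, h2⟩]; rfl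
    · rw [if_pos rfl, if_neg h2, if_neg (fun h => h2 h.2),
        List.getElem?_eq_none (by omega)]
  · rw [if_neg hij, if_neg (fun h => hij h.1.symm)]

theorem getD_set_row (t : List (List String)) (i j : Nat) (a : List String) :
    (t.set i a).getD j [] = if j = i ∧ i < t.length then a else t.getD j [] := by
  rw [List.getD_eq_getElem?_getD, List.getD_eq_getElem?_getD, List.getElem?_set]
  by_cases hij : i = j
  · subst hij
    by_cases h2 : i < t.length
    · rw [if_pos rfl, if_pos h2, if_pos ⟨rfl, h2⟩]; rfl
    · rw [if_pos rfl, if_neg h2, if_neg (fun h => h2 h.2),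
        List.getElem?_eq_none (by omega)]
  · rw [if_neg hij, if_neg (fun h => hij h.1.symm)]

def scatterInnerN (x : Nat) (col : List String) (n : Nat) (t : List (List String)) : List (List String) :=
  (List.range n).foldl (fun t y => t.set y ((t.getD y []).set x (col.getD y ""))) t

theorem scatterInnerN_length (x : Nat) (col : List String) (n : Nat) :
    ∀ t : List (List String), (scatterInnerN x col n t).length = t.length := by
  unfold scatterInnerN
  induction n with
  | zero => intro t; rfl
  | succ n ih =>
    intro t
    rw [List.range_succ, List.foldl_append]
    simp only [List.foldl]
    rw [List.length_set, ih t]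

theorem scatterInner_length (x : Nat) (col : List String) (t : List (List String)) :
    (scatterInner x col t).length = t.length :=
  scatterInnerN_length x col col.length t

-- characterisation of the inner scatter loop (truncated at n)
theorem scatterInnerN_getD (x : Nat) (col : List String) : ∀ (n : Nat) (t : List (List String)),
    n ≤ col.length → n ≤ t.length → ∀ y : Nat,
    (scatterInnerN x col n t).getD y []
      = if y < n then (t.getD y []).set x (col.getD y "") else t.getD y [] := by
  intro n
  induction n with
  | zero => intro t _ _ y; simp [scatterInnerN]
  | succ n ih =>
    intro t hn hnt y
    have hstep : scatterInnerN x col (n+1) t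
        = (scatterInnerN x col n t).set n (((scatterInnerN x col n t).getD n []).set x (col.getD n "")) := by
      unfold scatterInnerN
      rw [List.range_succ, List.foldl_append]
      rfl
    rw [hstep, getD_set_row, scatterInnerN_length]
    by_cases hy : y = n
    · subst hy
      rw [if_pos ⟨rfl, by omega⟩, ih t (by omega) (by omega) y,
        if_neg (lt_irrefl y), if_pos (by omega)]
    · rw [if_neg (by tauto), ih t (by omega) (by omega) y]
      by_cases h2 : y < n
      · rw [if_pos h2, if_pos (by omega)]
      · rw [if_neg h2, if_neg (by omega)]

theorem scatterInner_getD (x : Nat) (col : List String) (t : List (List String))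
    (h : col.length ≤ t.length) (y : Nat) :
    (scatterInner x col t).getD y []
      = if y < col.length then (t.getD y []).set x (col.getD y "") else t.getD y [] :=
  scatterInnerN_getD x col col.length t le_rfl h y

-- invariant for the outer scatter loop, starting from the blank transposed grid
theorem scatter_aux (xs : List (List String)) : ∀ k : Nat, k ≤ xs.length →
    (scatterK xs k).length = transM xs
    ∧ (∀ y : Nat, y < transM xs → ((scatterK xs k).getD y []).length = xs.length)
    ∧ ∀ y x' : Nat,
        ((scatterK xs k).getD y []).getD x' ""
          = if x' < k ∧ y < (xs.getD x' []).length then (xs.getD x' []).getD y "" else "" := by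
  intro k
  induction k with
  | zero =>
    intro _
    refine ⟨by simp [scatterK], ?_, ?_⟩
    · intro y hy
      show ((List.replicate (transM xs) (List.replicate xs.length "")).getD y []).length = xs.length
      rw [List.getD_eq_getElem?_getD, List.getElem?_replicate, if_pos hy]
      simp
    · intro y x'
      show ((List.replicate (transM xs) (List.replicate xs.length "")).getD y []).getD x' "" = _
      simp only [Nat.not_lt_zero, false_and, if_false]
      have hrow0 : (List.replicate (transM xs) (List.replicate xs.length "")).getD y []
          = if y < transM xs then List.replicate xs.length "" else [] := by
        rw [List.getD_eq_getElem?_getD, List.getElem?_replicate]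
        split <;> rfl
      rw [hrow0]
      split
      · rw [List.getD_eq_getElem?_getD, List.getElem?_replicate]
        split <;> rfl
      · rfl
  | succ k ih =>
    intro hk
    obtain ⟨ihlen, ihrow, ihget⟩ := ih (by omega)
    have hcolM : (xs.getD k []).length ≤ transM xs := sublen_le_max xs k
    have step : scatterK xs (k+1) = scatterInner k (xs.getD k []) (scatterK xs k) := by
      unfold scatterK
      rw [List.range_succ, List.foldl_append]
      rfl
    have hcolT : (xs.getD k []).length ≤ (scatterK xs k).length := by omega
    refine ⟨by rw [step, scatterInner_length, ihlen], ?_, ?_⟩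
    · intro y hy
      rw [step, scatterInner_getD _ _ _ hcolT]
      split
      · rw [List.length_set]; exact ihrow y hy
      · exact ihrow y hy
    · intro y x'
      rw [step, scatterInner_getD _ _ _ hcolT]
      by_cases hy : y < (xs.getD k []).length
      · rw [if_pos hy, getD_set_str, ihget y x']
        have hyM : y < transM xs := lt_of_lt_of_le hy hcolM
        rw [ihrow y hyM]
        by_cases hx : x' = k
        · subst hx
          rw [if_pos ⟨rfl, by omega⟩, if_pos ⟨by omega, hy⟩]
        · rw [if_neg (by tauto)]
          by_cases h2 : x' < k ∧ y < (xs.getD x' []).length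
          · rw [if_pos h2, if_pos ⟨by omega, h2.2⟩]
          · rw [if_neg h2, if_neg (by
              rintro ⟨h1', h2'⟩
              rcases Nat.lt_succ_iff_lt_or_eq.1 h1' with h | rfl
              · exact h2 ⟨h, h2'⟩
              · exact hx rfl)]
      · rw [if_neg hy, ihget y x']
        by_cases h2 : x' < k ∧ y < (xs.getD x' []).length
        · rw [if_pos h2, if_pos ⟨by omega, h2.2⟩]
        · rw [if_neg h2, if_neg (by
            rintro ⟨h1', h2'⟩
            rcases Nat.lt_succ_iff_lt_or_eq.1 h1' with h | rfl
            · exact h2 ⟨h, h2'⟩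
            · exact hy h2')]

-- A equals the closed column form
theorem fillTranspose_eq_colForm (xs : List (List String)) :
    fillTranspose xs = colForm xs := by
  obtain ⟨hlen, hrow, hget⟩ := scatter_aux xs xs.length le_rfl
  have hA : fillTranspose xs = scatterK xs xs.length := by
    show scatter xs (blankRows (pyMaxSubLen xs) xs.length) = _
    unfold scatter scatterK
    rw [pyMaxSubLen_eq, blankRows_eq]
  rw [hA, colForm]
  apply List.ext_getElem
  · rw [hlen]; simp
  · intro y h1 h2
    have hyM : y < transM xs := by simpa using h2
    have hrowlen : (scatterK xs xs.length)[y].length = xs.length := by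
      rw [← List.getD_eq_getElem _ [] h1]
      exact hrow y hyM
    rw [List.getElem_map, List.getElem_range]
    apply List.ext_getElem
    · rw [hrowlen]; simp
    · intro x hx1 hx2
      have hxL : x < xs.length := by simpa using hx2
      have hthis := hget y x
      rw [List.getD_eq_getElem _ [] h1, List.getD_eq_getElem _ _ hx1,
        List.getD_eq_getElem xs [] hxL] at hthis
      rw [hthis, List.getElem_map]
      by_cases hy : y < xs[x].length
      · rw [if_pos ⟨hxL, hy⟩, List.getD_eq_getElem _ _ hy]
      · rw [if_neg (by tauto), List.getD_eq_getElem?_getD, List.getElem?_eq_none (by omega)]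
        rfl

-- transM over a snoc
theorem transM_snoc (p : List (List String)) (r : List String) :
    transM (p ++ [r]) = max (transM p) r.length := by
  unfold transM
  rw [List.map_append, List.foldl_append]
  rfl

-- a row shorter than i contributes ""
theorem map_getD_of_ge (p : List (List String)) (i : Nat) (hi : transM p ≤ i) :
    p.map (fun row => row.getD i "") = List.replicate p.length "" := by
  rw [List.eq_replicate_iff]
  refine ⟨by simp, ?_⟩
  intro b hb
  obtain ⟨row, hrow, rfl⟩ := List.mem_map.1 hb
  have : row.length ≤ transM p := (le_foldl_max _ 0).2 _ (List.mem_map.2 ⟨row, hrow, rfl⟩)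
  rw [List.getD_eq_getElem?_getD, List.getElem?_eq_none (by omega)]
  rfl

-- one step of B's streaming loop extends the closed column form by one row
theorem growStep_colForm (p : List (List String)) (r : List String) :
    growStep p.length (colForm p) r = colForm (p ++ [r]) := by
  have hlenCF : (colForm p).length = transM p := by simp [colForm]
  unfold growStep
  simp only [hlenCF]
  have hpad : colForm p ++ List.replicate (r.length - transM p) (List.replicate p.length "")
      = (List.range (transM (p ++ [r]))).map (fun i => p.map (fun row => row.getD i "")) := by
    rw [transM_snoc]
    apply List.ext_getElem
    · simp; omega
    · intro i h1 h2
      rw [List.getElem_map, List.getElem_range]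
      by_cases hi : i < transM p
      · rw [List.getElem_append_left (by simpa [colForm] using hi)]
        simp [colForm]
      · rw [List.getElem_append_right (by simpa [colForm] using hi),
          List.getElem_replicate, map_getD_of_ge p i (by omega)]
  rw [hpad, colForm, transM_snoc]
  apply List.ext_getElem
  · simp
  · intro i h1 h2
    simp only [List.getElem_mapIdx, List.getElem_map, List.getElem_range, List.map_append]
    rfl

-- B's foldl, run from the state after a prefix p, computes colForm of the whole list
theorem alt_foldl_inv (xs : List (List String)) : ∀ p : List (List String),
    xs.foldl (fun (st : Nat × List (List String)) row =>
        (st.1 + 1, growStep st.1 st.2 row)) (p.length, colForm p)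
      = ((p ++ xs).length, colForm (p ++ xs)) := by
  induction xs with
  | nil => intro p; simp
  | cons r xs ih =>
    intro p
    simp only [List.foldl]
    rw [growStep_colForm]
    have : p.length + 1 = (p ++ [r]).length := by simp
    rw [this, ih (p ++ [r])]
    simp

theorem fillTranspose_eq_alt (xs : List (List String)) :
    fillTranspose xs = fillTranspose_alt xs := by
  rw [fillTranspose_eq_colForm]
  unfold fillTranspose_alt
  have h0 : ((0 : Nat), ([] : List (List String))) = (([] : List (List String)).length, colForm []) := by
    simp [colForm, transM]
  rw [h0, alt_foldl_inv xs []]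
  simp

-- ===== VERDICT (by name: the statement is the Claim_ definition above) =====
theorem fillTranspose_spec : Claim_equal_fillTranspose := by
  intro xs _
  exact fillTranspose_eq_alt xs
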